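-- pv_equiv track=rewrite | github.com/mkhnuser/algoexpert_algo_problems | best_seats.py | find_the_best_seat
-- ===== SOURCE A (Python) =====
-- def find_the_best_seat(candidate_indexes):
--     # NOTE: At this point we have at least one candidate seat.
--
--     # NOTE: [1, 3, 4, 5]
--     #        0  1  2  3
--
--     the_best_seat = candidate_indexes[0]
--     the_best_range = 1
--     current_range = 1
--     the_best_left_index = 0
--     the_best_right_index = 0
--     current_right_index = 0
--     current_left_index = 0
--
--     for i in range(len(candidate_indexes) - 1):
--         if candidate_indexes[i] + 1 == candidate_indexes[i + 1]:
--             current_range += 1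
--             current_right_index = i + 1
--         else:
--             if current_range > the_best_range:
--                 the_best_range = current_range
--                 the_best_left_index = current_left_index
--                 the_best_right_index = current_right_index
--
--             current_range = 1
--             current_left_index = i + 1
--             current_right_index = i + 1
--
--     # NOTE: A safeguard if we never hit else before. Consider: [1, 3, 4, 5].
--     if current_range > the_best_range:
--         the_best_range = current_range
--         the_best_left_index = current_left_index
--         the_best_right_index = current_right_index
--
--     return candidate_indexes[(the_best_left_index + the_best_right_index) // 2]
-- ===== SOURCE B (Python) =====
-- def find_the_best_seat(candidate_indexes):
--     # Build the consecutive runs as (start, end) position pairs in one pass,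
--     # then pick the first run of maximal length and return its middle seat.
--     runs = []
--     start = 0
--     for i in range(1, len(candidate_indexes)):
--         if candidate_indexes[i - 1] + 1 != candidate_indexes[i]:
--             runs.append((start, i - 1))
--             start = i
--     runs.append((start, len(candidate_indexes) - 1))
--
--     best = runs[0]
--     for s, e in runs[1:]:
--         if e - s > best[1] - best[0]:
--             best = (s, e)
--     return candidate_indexes[(best[0] + best[1]) // 2]
-- ===== Notes on version B (the rewrite author's own statement) =====
-- stated objective: alternative
-- what changed: Instead of tracking best/current run bounds in interleaved mutable counters inside one guarded loop, B first materialises the list of runs as (start,end) position pairs in one pass, then selects the first longest run and indexes its midpoint.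
import Mathlib
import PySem

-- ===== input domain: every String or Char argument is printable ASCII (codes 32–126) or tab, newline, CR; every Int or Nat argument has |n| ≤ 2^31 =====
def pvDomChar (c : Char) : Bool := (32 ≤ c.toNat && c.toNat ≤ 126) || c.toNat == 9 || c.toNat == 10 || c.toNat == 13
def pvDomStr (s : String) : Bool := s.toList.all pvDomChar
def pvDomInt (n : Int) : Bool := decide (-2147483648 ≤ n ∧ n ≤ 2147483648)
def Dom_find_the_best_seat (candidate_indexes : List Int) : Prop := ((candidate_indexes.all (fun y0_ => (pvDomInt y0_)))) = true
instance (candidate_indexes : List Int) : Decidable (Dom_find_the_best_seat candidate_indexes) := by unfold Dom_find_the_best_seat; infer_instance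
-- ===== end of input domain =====

-- B differs from A by decomposition only: it builds the list of runs first, then selects the
-- first longest run; the proof relates A's interleaved best/current counters to that runs list.

-- ===== PORT A =====
-- state = (the_best_seat, the_best_range, current_range, the_best_left_index,
--          the_best_right_index, current_right_index, current_left_index)
def stepA (xs : List Int) : (Int × Int × Int × Int × Int × Int × Int) → Int → (Int × Int × Int × Int × Int × Int × Int)
  | (bSeat, bRange, cRange, bL, bR, cR, cL), i =>
    if PySem.List.pyGetD xs i 0 + 1 = PySem.List.pyGetD xs (i + 1) 0 then
      (bSeat, bRange, cRange + 1, bL, bR, i + 1, cL)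
    else if cRange > bRange then
      (bSeat, cRange, 1, cL, cR, i + 1, i + 1)
    else
      (bSeat, bRange, 1, bL, bR, i + 1, i + 1)

def find_the_best_seat (candidate_indexes : List Int) : Int :=
  match (PySem.List.pyRange 0 ((candidate_indexes.length : Int) - 1) 1).foldl
      (stepA candidate_indexes)
      (PySem.List.pyGetD candidate_indexes 0 0, 1, 1, 0, 0, 0, 0) with
  | (_, bRange, cRange, bL, bR, cR, cL) =>
    -- final safeguard, then index the middle of the best range
    match (if cRange > bRange then (cRange, cL, cR) else (bRange, bL, bR) : Int × Int × Int) with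
    | (_, l, r) => PySem.List.pyGetD candidate_indexes (PySem.Int.floordiv (l + r) 2) 0

-- ===== PORT B =====
-- state = (runs built so far, start of the current run)
def stepB (xs : List Int) : (List (Int × Int) × Int) → Int → (List (Int × Int) × Int)
  | (runs, start), i =>
    if PySem.List.pyGetD xs (i - 1) 0 + 1 ≠ PySem.List.pyGetD xs i 0 then
      (runs ++ [(start, i - 1)], i)
    else (runs, start)

def bestStep : (Int × Int) → (Int × Int) → Int × Int
  | (bs, be), (s, e) => if e - s > be - bs then (s, e) else (bs, be)

-- best = runs[0]; for (s,e) in runs[1:]: keep the strictly longer run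
def pickBest (runs : List (Int × Int)) : Int × Int :=
  (runs.drop 1).foldl bestStep (runs.headD (0, 0))

def find_the_best_seat_alt (candidate_indexes : List Int) : Int :=
  match (PySem.List.pyRange 1 (candidate_indexes.length : Int) 1).foldl
      (stepB candidate_indexes) ([], 0) with
  | (runs0, start) =>
    match pickBest (runs0 ++ [(start, (candidate_indexes.length : Int) - 1)]) with
    | (s, e) => PySem.List.pyGetD candidate_indexes (PySem.Int.floordiv (s + e) 2) 0

-- ===== PRECONDITION & SPEC =====
-- Python A raises IndexError on the empty list (candidate_indexes[0]); B raises there too.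
def Pre_find_the_best_seat (candidate_indexes : List Int) : Prop := candidate_indexes ≠ []
instance (candidate_indexes : List Int) : Decidable (Pre_find_the_best_seat candidate_indexes) := by unfold Pre_find_the_best_seat; infer_instance
def pvWitness_find_the_best_seat : List Int := [1, 3, 4, 5]

def Spec_find_the_best_seat (candidate_indexes : List Int) (out : Int) : Prop := out = find_the_best_seat_alt candidate_indexes
instance (candidate_indexes : List Int) (out : Int) : Decidable (Spec_find_the_best_seat candidate_indexes out) := by unfold Spec_find_the_best_seat; infer_instance

-- ===== CLAIM (what is proved, stated in full; the proofs are below) =====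
def Claim_equal_find_the_best_seat : Prop := ∀ (candidate_indexes : List Int), Dom_find_the_best_seat candidate_indexes → Pre_find_the_best_seat candidate_indexes → Spec_find_the_best_seat candidate_indexes (find_the_best_seat candidate_indexes)

-- ===== LEMMAS AND PROOFS =====

-- A-shaped selection step over completed runs: keeps (best_range, best_left, best_right).
def selA : (Int × Int × Int) → (Int × Int) → Int × Int × Int
  | (br, bl, bre), (s, e) => if e - s + 1 > br then (e - s + 1, s, e) else (br, bl, bre)

-- folding selA from a run-shaped seed is folding bestStep on the (start,end) pairs
lemma sel_best (rs : List (Int × Int)) : ∀ (s e : Int),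
    rs.foldl selA (e - s + 1, s, e)
      = ((rs.foldl bestStep (s, e)).2 - (rs.foldl bestStep (s, e)).1 + 1,
         (rs.foldl bestStep (s, e)).1, (rs.foldl bestStep (s, e)).2) := by
  induction rs with
  | nil => intro s e; simp
  | cons p rs ih =>
    intro s e
    obtain ⟨s', e'⟩ := p
    simp only [List.foldl_cons, selA, bestStep]
    by_cases h : e' - s' > e - s
    · rw [if_pos (by omega), if_pos h]; exact ih s' e'
    · rw [if_neg (by omega), if_neg h]; exact ih s e

-- main invariant relating A's counter state to B's runs-list state after k steps
lemma inv_fold (xs : List Int) : ∀ (k : Nat),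
    ∃ (runs : List (Int × Int)) (start : Int),
      (PySem.List.pyRange 1 ((k : Int) + 1) 1).foldl (stepB xs) ([], 0) = (runs, start) ∧
      (PySem.List.pyRange 0 (k : Int) 1).foldl (stepA xs)
          (PySem.List.pyGetD xs 0 0, 1, 1, 0, 0, 0, 0)
        = (PySem.List.pyGetD xs 0 0, (runs.foldl selA (1, 0, 0)).1, (k : Int) - start + 1,
           (runs.foldl selA (1, 0, 0)).2.1, (runs.foldl selA (1, 0, 0)).2.2, (k : Int), start) ∧
      0 ≤ start ∧ start ≤ (k : Int) ∧
      (runs = [] → start = 0) ∧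
      (runs ≠ [] → ∃ e0 rest, runs = (0, e0) :: rest ∧ 0 ≤ e0) := by
  intro k
  induction k with
  | zero =>
    refine ⟨[], 0, ?_, ?_, by omega, by omega, fun _ => rfl, fun h => absurd rfl h⟩
    · simp [PySem.List.pyRange_one_eq_nil]
    · simp [PySem.List.pyRange_one_eq_nil]
  | succ k ih =>
    obtain ⟨runs, start, hB, hA, h0, hk, hnil, hhead⟩ := ih
    have e1 : ((k + 1 : Nat) : Int) = (k : Int) + 1 := by push_cast; ring
    have hr1 : PySem.List.pyRange 0 ((k : Int) + 1) 1
        = PySem.List.pyRange 0 (k : Int) 1 ++ [(k : Int)] :=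
      PySem.List.pyRange_one_succ_right (by positivity)
    have hr2 : PySem.List.pyRange 1 ((k : Int) + 1 + 1) 1
        = PySem.List.pyRange 1 ((k : Int) + 1) 1 ++ [(k : Int) + 1] :=
      PySem.List.pyRange_one_succ_right (by omega)
    have hm1 : (k : Int) + 1 - 1 = (k : Int) := by ring
    by_cases hc : PySem.List.pyGetD xs (k : Int) 0 + 1 = PySem.List.pyGetD xs ((k : Int) + 1) 0
    · -- consecutive: B keeps its state, A extends the current run
      refine ⟨runs, start, ?_, ?_, h0, by omega, hnil, hhead⟩
      · rw [e1, hr2, List.foldl_append, hB]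
        simp only [List.foldl_cons, List.foldl_nil, stepB, hm1]
        rw [if_neg (by simpa using hc)]
      · rw [e1, hr1, List.foldl_append, hA]
        simp only [List.foldl_cons, List.foldl_nil, stepA]
        rw [if_pos hc]
        simp only [Prod.mk.injEq, and_true, true_and]
        omega
    · -- break: B appends the finished run (start, k), A compares and resets
      refine ⟨runs ++ [(start, (k : Int))], (k : Int) + 1, ?_, ?_, by omega, by omega,
        by simp, ?_⟩
      · rw [e1, hr2, List.foldl_append, hB]
        simp only [List.foldl_cons, List.foldl_nil, stepB, hm1]
        rw [if_pos (by simpa using hc)]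
      · rcases hFe : runs.foldl selA (1, 0, 0) with ⟨br, bl, bre⟩
        rw [e1, hr1, List.foldl_append, hA, hFe]
        simp only [List.foldl_cons, List.foldl_nil, stepA]
        rw [if_neg hc]
        rw [List.foldl_append, hFe]
        simp only [List.foldl_cons, List.foldl_nil, selA]
        by_cases hgt : (k : Int) - start + 1 > br
        · rw [if_pos hgt, if_pos hgt]
          simp only [Prod.mk.injEq, and_true, true_and]
          omega
        · rw [if_neg hgt, if_neg hgt]
          simp only [Prod.mk.injEq, and_true, true_and]
          omega
      · intro _
        rcases h : runs with _ | ⟨p, rest⟩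
        · exact ⟨(k : Int), [], by simp [hnil h], by positivity⟩
        · obtain ⟨e0, rest', heq, he0⟩ := hhead (by simp [h])
          rw [← h] at *
          refine ⟨e0, rest' ++ [(start, (k : Int))], ?_, he0⟩
          rw [heq]
          simp

theorem find_the_best_seat_spec_aux (xs : List Int) (hne : xs ≠ []) :
    find_the_best_seat xs = find_the_best_seat_alt xs := by
  obtain ⟨n, hn⟩ : ∃ n : Nat, xs.length = n + 1 :=
    ⟨xs.length - 1, by have := List.length_pos_iff.mpr hne; omega⟩
  have hcast : (xs.length : Int) = (n : Int) + 1 := by rw [hn]; push_cast; ring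
  obtain ⟨runs, start, hB, hA, h0, hk, hnil, hhead⟩ := inv_fold xs n
  unfold find_the_best_seat find_the_best_seat_alt
  have hsub : (n : Int) + 1 - 1 = (n : Int) := by ring
  rw [hcast, hsub, hA, hB]
  rcases runs with _ | ⟨p, rest⟩
  · -- no break ever happened: the single run is (0, n)
    have hs0 : start = 0 := hnil rfl
    subst hs0
    simp only [List.foldl_nil, List.nil_append, pickBest, List.drop_succ_cons,
      List.drop_nil, List.headD_cons]
    split_ifs with hgt
    · rfl
    · have hz : (n : Int) = 0 := by omega
      simp [hz]
  · obtain ⟨e0, rest', heq, he0⟩ := hhead (by simp)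
    injection heq with h1 h2
    subst h1; subst h2
    have hseed : selA (1, 0, 0) (0, e0) = (e0 - 0 + 1, 0, e0) := by
      simp only [selA]
      by_cases h : e0 - 0 + 1 > 1
      · rw [if_pos h]
      · rw [if_neg h]
        have hz : e0 = 0 := by omega
        simp [hz]
    rcases hbe : List.foldl bestStep (0, e0) rest with ⟨b1, b2⟩
    simp only [List.foldl_cons, hseed, sel_best, hbe, pickBest, List.cons_append,
      List.drop_succ_cons, List.drop_zero, List.headD_cons, List.foldl_append,
      List.foldl_nil, bestStep]
    by_cases hgt : (n : Int) - start > b2 - b1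
    · rw [if_pos (by omega), if_pos hgt]
    · rw [if_neg (by omega), if_neg hgt]

-- ===== VERDICT (by name: the statement is the Claim_ definition above) =====
theorem find_the_best_seat_spec : Claim_equal_find_the_best_seat := by
  intro xs _ hpre
  exact find_the_best_seat_spec_aux xs hpre
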